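-- pv_equiv track=rewrite | github.com/eharquin/ai27-projet | projet/client/crocomine.py | max_n
-- ===== SOURCE A (Python) =====
-- from typing import List, Tuple, Dict
-- import itertools
--
-- def max_n(vars: List[int], n: int) -> List[List[int]]:
--     result = []
--     temp = itertools.combinations(vars, n+1)
--     for a in temp:
--         oneTab = []
--         for b in a:
--             oneTab.append(-b)
--         result.append(oneTab)
--     return result
-- ===== SOURCE B (Python) =====
-- def max_n(xs, n):
--     r = n + 1
--     if r < 0:
--         raise ValueError("r must be non-negative")
--
--     def helper(start, k):
--         if k == 0:
--             return [[]]
--         res = []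
--         for i in range(start, len(xs) - k + 1):
--             for rest in helper(i + 1, k - 1):
--                 res.append([-xs[i]] + rest)
--         return res
--
--     return helper(0, r)
-- ===== Notes on version B (the rewrite author's own statement) =====
-- stated objective: alternative
-- what changed: Replaced the itertools.combinations call plus an inner negate-and-copy loop by a direct recursive index enumerator helper(start,k) that builds each negated combination as it selects indices, reproducing itertools' lexicographic order without the library.
import Mathlib
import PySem

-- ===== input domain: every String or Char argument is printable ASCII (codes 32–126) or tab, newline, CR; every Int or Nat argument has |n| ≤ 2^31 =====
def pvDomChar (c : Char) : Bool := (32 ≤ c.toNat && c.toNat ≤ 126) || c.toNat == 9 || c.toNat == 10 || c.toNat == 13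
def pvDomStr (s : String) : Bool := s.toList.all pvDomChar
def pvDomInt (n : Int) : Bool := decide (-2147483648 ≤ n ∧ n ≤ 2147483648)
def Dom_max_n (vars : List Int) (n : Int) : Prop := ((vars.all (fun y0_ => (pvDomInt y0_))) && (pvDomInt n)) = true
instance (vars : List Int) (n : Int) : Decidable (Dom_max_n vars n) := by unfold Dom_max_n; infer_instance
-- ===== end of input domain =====

-- B replaces the itertools.combinations call by a direct recursive index enumerator
-- that negates elements as it selects them (objective: alternative decomposition).

-- ===== PORT A =====
-- itertools.combinations(xs, k) in lexicographic order (standard recursive characterisation;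
-- PySem has no combinations primitive)
def pvCombs (xs : List Int) (k : Nat) : List (List Int) :=
  match xs, k with
  | _, 0 => [[]]
  | [], _ + 1 => []
  | x :: rest, k + 1 => (pvCombs rest k).map (x :: ·) ++ pvCombs rest (k + 1)

def max_n (vars : List Int) (n : Int) : List (List Int) :=
  -- A raises ValueError when n + 1 < 0 (excluded by Pre_); .toNat only reached with 0 ≤ n + 1
  (pvCombs vars (n + 1).toNat).foldl
    (fun result a =>
      result ++ [a.foldl (fun oneTab b => oneTab ++ [-b]) []]) []

-- ===== PORT B =====
-- helper(start, k) from Source B: enumerate index combinations from `start` upward,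
-- negating each selected element.  Indices produced by range(start, len - k + 1)
-- are always < len, so getD never takes its default.
def pvBHelper (vars : List Int) : Nat → Nat → List (List Int)
  | _, 0 => [[]]
  | start, k + 1 =>
    (List.range' start (vars.length + 1 - (k + 1) - start)).foldl
      (fun res i =>
        (pvBHelper vars (i + 1) k).foldl
          (fun res2 rest => res2 ++ [(-(vars.getD i 0)) :: rest]) res) []

def max_n_alt (vars : List Int) (n : Int) : List (List Int) :=
  -- Source B raises ValueError when n + 1 < 0 (excluded by Pre_)
  pvBHelper vars 0 (n + 1).toNat

-- ===== PRECONDITION & SPEC =====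
-- A (and B) raise ValueError when n + 1 < 0; exactly those inputs are excluded.
def Pre_max_n (vars : List Int) (n : Int) : Prop := -1 ≤ n
instance (vars : List Int) (n : Int) : Decidable (Pre_max_n vars n) := by unfold Pre_max_n; infer_instance
def pvWitness_max_n : List Int × Int := ([1, -2, 3], 1)

def Spec_max_n (vars : List Int) (n : Int) (out : List (List Int)) : Prop := out = max_n_alt vars n
instance (vars : List Int) (n : Int) (out : List (List Int)) : Decidable (Spec_max_n vars n out) := by unfold Spec_max_n; infer_instance

-- ===== CLAIM (what is proved, stated in full; the proofs are below) =====
def Claim_equal_max_n : Prop := ∀ (vars : List Int) (n : Int), Dom_max_n vars n → Pre_max_n vars n → Spec_max_n vars n (max_n vars n)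

-- ===== LEMMAS AND PROOFS =====

-- pvCombs on k = 0 regardless of the list's shape
theorem pvCombs_zero (xs : List Int) : pvCombs xs 0 = [[]] := by
  cases xs <;> rfl

-- combinations of a too-short list are empty
theorem pvCombs_nil_of_lt (xs : List Int) (k : Nat) (h : xs.length < k) : pvCombs xs k = [] := by
  induction xs generalizing k with
  | nil =>
    cases k with
    | zero => omega
    | succ k => rfl
  | cons x rest ih =>
    cases k with
    | zero => omega
    | succ k =>
      simp only [pvCombs]
      rw [ih k (by simpa using h), ih (k + 1) (by simp at h; omega)]
      rfl

-- B's body, with both append-accumulator loops collapsed to a flatMap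
theorem pvBHelper_succ_eq (vars : List Int) (start k : Nat) :
    pvBHelper vars start (k + 1) =
      (List.range' start (vars.length + 1 - (k + 1) - start)).flatMap
        (fun i => (pvBHelper vars (i + 1) k).map (fun rest => (-(vars.getD i 0)) :: rest)) := by
  simp only [pvBHelper, PySem.List.foldl_append_singleton_eq_map]
  rw [PySem.List.foldl_append_eq_flatMap]
  rfl

-- B's helper computes the negated combinations of the suffix vars.drop start
theorem pvBHelper_eq (vars : List Int) (k : Nat) : ∀ start,
    pvBHelper vars start k = (pvCombs (vars.drop start) k).map (fun a => a.map (fun b => -b)) := by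
  induction k with
  | zero => intro start; rw [pvCombs_zero]; rfl
  | succ k ihk =>
    -- inner induction on the remaining length of the suffix, as fuel
    suffices h : ∀ m start, vars.length - start ≤ m →
        pvBHelper vars start (k + 1) = (pvCombs (vars.drop start) (k + 1)).map (fun a => a.map (fun b => -b)) by
      intro start; exact h (vars.length - start) start le_rfl
    intro m
    induction m with
    | zero =>
      intro start hm
      -- start ≥ vars.length: no index fits and the suffix is empty
      rw [pvBHelper_succ_eq]
      have hc : vars.length + 1 - (k + 1) - start = 0 := by omega
      rw [hc, List.drop_eq_nil_of_le (by omega)]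
      rfl
    | succ m ihm =>
      intro start hm
      rw [pvBHelper_succ_eq]
      by_cases hc : vars.length + 1 - (k + 1) - start = 0
      · -- no index fits: both sides are empty
        rw [hc]
        have hdrop : (vars.drop start).length < k + 1 := by
          simp only [List.length_drop]; omega
        rw [pvCombs_nil_of_lt _ _ hdrop]
        rfl
      · -- start < vars.length and at least k+1 elements remain after start
        have hstart : start < vars.length := by omega
        have hcons : List.range' start (vars.length + 1 - (k + 1) - start) =
            start :: List.range' (start + 1) (vars.length + 1 - (k + 1) - (start + 1)) := by
          have he : vars.length + 1 - (k + 1) - start =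
              (vars.length + 1 - (k + 1) - (start + 1)) + 1 := by omega
          rw [he, List.range'_succ]
        rw [hcons, List.flatMap_cons, ← pvBHelper_succ_eq,
            ihk (start + 1), ihm (start + 1) (by omega),
            List.drop_eq_getElem_cons hstart]
        have hget : vars.getD start 0 = vars[start] := List.getD_eq_getElem vars 0 hstart
        simp only [pvCombs, List.map_append, List.map_map, hget]
        simp [Function.comp_def]

-- A, after collapsing its two append-accumulator loops, is map-negate over pvCombs
theorem max_n_eq_map (vars : List Int) (n : Int) :
    max_n vars n = (pvCombs vars (n + 1).toNat).map (fun a => a.map (fun b => -b)) := by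
  unfold max_n
  simp only [PySem.List.foldl_append_singleton_eq_map]
  rfl

-- ===== VERDICT (by name: the statement is the Claim_ definition above) =====
theorem max_n_spec : Claim_equal_max_n := by
  intro vars n _ _
  unfold Spec_max_n max_n_alt
  rw [pvBHelper_eq vars (n + 1).toNat 0, List.drop_zero, max_n_eq_map]
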